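-- pv_equiv track=rewrite | github.com/tzvetana/pyStart | task3.2.py | pairs_multiply
-- ===== SOURCE A (Python) =====
-- def pairs_multiply(list):
--     results = []
--     while len(list) > 1:
--         results.append(list[0] * list[-1])
--         del list[0]
--         del list[-1]
--     if len(list) ==1: results.append(list[0] **2)
--     return results
-- ===== SOURCE B (Python) =====
-- def pairs_multiply(list):
--     n = len(list)
--     half = n // 2
--     res = [a * b for a, b in zip(list[:half], reversed(list[n - half:]))]
--     if n % 2:
--         res.append(list[half] ** 2)
--     return res
-- ===== Notes on version B (the rewrite author's own statement) =====
-- stated objective: faster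
-- what changed: B reads the answer directly by zipping the first half with the reversed second half (plus the squared middle element when the length is odd), instead of A's destructive loop that repeatedly deletes the first and last element of the list; B also does not mutate the argument (A empties it).
import Mathlib
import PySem

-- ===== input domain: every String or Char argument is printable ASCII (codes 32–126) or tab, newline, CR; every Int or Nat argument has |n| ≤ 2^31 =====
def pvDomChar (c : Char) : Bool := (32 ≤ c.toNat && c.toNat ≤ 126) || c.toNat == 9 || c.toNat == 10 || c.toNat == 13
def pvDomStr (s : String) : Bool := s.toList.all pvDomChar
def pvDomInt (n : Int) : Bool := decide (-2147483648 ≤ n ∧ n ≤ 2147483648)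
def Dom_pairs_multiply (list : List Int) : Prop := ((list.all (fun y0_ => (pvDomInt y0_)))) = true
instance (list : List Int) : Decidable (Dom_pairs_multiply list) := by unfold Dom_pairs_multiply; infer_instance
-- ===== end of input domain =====

-- B replaces A's destructive delete-both-ends loop by a single zip of the first half with
-- the reversed second half; equivalence is about the RETURN value only (Python A empties
-- the caller's list in place, B does not mutate it).

-- ===== PORT A =====
-- While len(list) > 1: append list[0]*list[-1], del list[0], del list[-1].
-- With list = x :: y :: ys, list[-1] is (y::ys).getLast and the two deletions leave (y::ys).dropLast.
def pairs_multiply (list : List Int) : List Int :=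
  match list with
  | [] => []
  | [x] => [x * x]
  | x :: y :: ys => (x * ((y :: ys).getLast (by simp))) :: pairs_multiply ((y :: ys).dropLast)
termination_by list.length
decreasing_by simp [List.length_dropLast]

-- ===== PORT B =====
def pairs_multiply_alt (list : List Int) : List Int :=
  let n := list.length
  let half := n / 2
  let res := ((list.take half).zip ((list.drop (n - half)).reverse)).map (fun p => p.1 * p.2)
  -- list[half]: when n is odd the index half is in range, so the getD default is never used
  if n % 2 = 1 then res ++ [((PySem.List.pyGet? list (half : Int)).getD 0) ^ 2] else res

-- ===== PRECONDITION & SPEC =====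
def Spec_pairs_multiply (list : List Int) (out : List Int) : Prop := out = pairs_multiply_alt list
instance (list : List Int) (out : List Int) : Decidable (Spec_pairs_multiply list out) := by unfold Spec_pairs_multiply; infer_instance

-- ===== CLAIM (what is proved, stated in full; the proofs are below) =====
def Claim_equal_pairs_multiply : Prop := ∀ (list : List Int), Dom_pairs_multiply list → Spec_pairs_multiply list (pairs_multiply list)

-- ===== LEMMAS AND PROOFS =====

-- B's closed-form computation agrees with stripping one pair off both ends.
theorem alt_step (x z : Int) (zs : List Int) :
    pairs_multiply_alt (x :: (zs ++ [z])) = (x * z) :: pairs_multiply_alt zs := by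
  simp only [pairs_multiply_alt]
  have hlen : (x :: (zs ++ [z])).length = zs.length + 2 := by simp
  have hhalf : (zs.length + 2) / 2 = zs.length / 2 + 1 := by omega
  have hle : zs.length / 2 ≤ zs.length := Nat.div_le_self _ _
  have hdrop : zs.length + 2 - (zs.length / 2 + 1) = (zs.length - zs.length / 2) + 1 := by omega
  have hle2 : zs.length - zs.length / 2 ≤ zs.length := Nat.sub_le _ _
  have hmod : (zs.length + 2) % 2 = zs.length % 2 := by omega
  simp only [hlen, hhalf, hdrop, hmod, List.take_succ_cons, List.drop_succ_cons,
    List.take_append_of_le_length hle, List.drop_append_of_le_length hle2,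
    List.reverse_append, List.reverse_cons, List.reverse_nil, List.nil_append,
    List.cons_append, List.zip_cons_cons, List.map_cons]
  by_cases hodd : zs.length % 2 = 1
  · have hlt : zs.length / 2 < zs.length := by omega
    have hget : PySem.List.pyGet? (x :: (zs ++ [z])) ((zs.length / 2 + 1 : Nat) : Int)
        = zs[zs.length / 2]? := by
      rw [PySem.List.pyGet?_natCast]
      simp [List.getElem?_append_left, hlt]
    rw [hget, PySem.List.pyGet?_natCast]
    simp [hodd]
  · simp [hodd]

theorem pairs_eq (list : List Int) : pairs_multiply list = pairs_multiply_alt list := by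
  induction hl : list.length using Nat.strong_induction_on generalizing list with
  | _ n ih =>
    match list with
    | [] => simp [pairs_multiply, pairs_multiply_alt]
    | [x] =>
      simp [pairs_multiply, pairs_multiply_alt, PySem.List.pyGet?, PySem.List.pyIdx?, sq]
    | x :: y :: ys =>
      rcases List.eq_nil_or_concat (y :: ys) with h | ⟨zs, z, h⟩
      · simp at h
      · rw [List.concat_eq_append] at h
        have hlast : (y :: ys).getLast (by simp) = z := by simp [h]
        have hdl : (y :: ys).dropLast = zs := by simp [h]
        have hrec : pairs_multiply zs = pairs_multiply_alt zs := by
          apply ih zs.length _ zs rfl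
          have h2 : (y :: ys).length = zs.length + 1 := by simp [h]
          simp at hl h2; omega
        calc pairs_multiply (x :: y :: ys)
            = (x * z) :: pairs_multiply zs := by
              rw [pairs_multiply]; rw [hlast, hdl]
          _ = (x * z) :: pairs_multiply_alt zs := by rw [hrec]
          _ = pairs_multiply_alt (x :: (zs ++ [z])) := (alt_step x z zs).symm
          _ = pairs_multiply_alt (x :: y :: ys) := by rw [h]

-- ===== VERDICT (by name: the statement is the Claim_ definition above) =====
theorem pairs_multiply_spec : Claim_equal_pairs_multiply := by
  intro l _
  exact pairs_eq l
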